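-- pv_equiv track=rewrite | github.com/xsarmalenka/AdventOfCode | Advent of Code 2024/Day 12/day12_part1.py | get_regions
-- ===== SOURCE A (Python) =====
-- from collections import deque
--
-- def get_plant_positions(field, plant):
--     positions = []
--     for i, row in enumerate(field):
--         for j, clm in enumerate(row):
--             if clm == plant:
--                 positions.append((i, j))
--     return positions
--
-- def get_regions(field, plant):
--     plant_positions = get_plant_positions(field, plant)
--     regions = []
--     visited = set()
--     directions = [(-1, 0), (1, 0), (0, -1), (0, 1)]
--
--     def bfs(start):
--         queue = deque([start])
--         region = set([start])
--         visited.add(start)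
--
--         while queue:
--             x, y = queue.popleft()
--             for dx, dy in directions:
--                 neighbor = (x + dx, y + dy)
--                 if neighbor in plant_positions and neighbor not in visited:
--                     visited.add(neighbor)
--                     region.add(neighbor)
--                     queue.append(neighbor)
--         return region
--
--     def position_in_any_region(position, regions):
--         for region in regions:
--             if position in region:
--                 return True, region
--         return False, None
--
--     for position in plant_positions:
--         if position not in visited:
--             new_region = bfs(position)
--             regions.append(new_region)
--
--     return regions
-- ===== SOURCE B (Python) =====
-- def get_regions(field, plant):
--     positions = [(i, j) for i, row in enumerate(field) for j, c in enumerate(row) if c == plant]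
--     label = {}    # cell -> representative cell of its region so far
--     members = {}  # representative -> list of cells of its region, in merge order
--     for p in positions:
--         i, j = p
--         roots = []
--         for q in ((i - 1, j), (i, j - 1)):
--             if q in label and label[q] not in roots:
--                 roots.append(label[q])
--         if not roots:
--             label[p] = p
--             members[p] = [p]
--         else:
--             r = min(roots)
--             label[p] = r
--             members[r].append(p)
--             for r2 in roots:
--                 if r2 != r:
--                     for q in members.pop(r2):
--                         label[q] = r
--                         members[r].append(q)
--     return [set(g) for g in members.values()]
-- ===== Notes on version B (the rewrite author's own statement) =====
-- stated objective: alternative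
-- what changed: Replaces A's per-start BFS flood fill (deque + linear membership scans of the positions list) by a single row-major pass of union-by-relabel connected-component labelling: each plant cell is merged with the classes of its up/left neighbours via a cell->root dict and a root->members dict, regions emerging keyed by each component's first (row-major) cell.
import Mathlib
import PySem

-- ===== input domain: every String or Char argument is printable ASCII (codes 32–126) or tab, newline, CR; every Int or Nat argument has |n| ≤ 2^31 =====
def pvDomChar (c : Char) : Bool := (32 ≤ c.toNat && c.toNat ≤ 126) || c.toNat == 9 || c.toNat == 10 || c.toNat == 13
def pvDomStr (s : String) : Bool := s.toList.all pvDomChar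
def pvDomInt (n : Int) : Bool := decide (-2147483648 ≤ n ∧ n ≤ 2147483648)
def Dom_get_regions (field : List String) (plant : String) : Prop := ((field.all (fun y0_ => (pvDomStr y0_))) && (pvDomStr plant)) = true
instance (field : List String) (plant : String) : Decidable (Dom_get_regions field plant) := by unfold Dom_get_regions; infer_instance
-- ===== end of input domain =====

-- B replaces A's queue-based BFS flood fill by a single row-major pass of union-by-relabel
-- connected-component labelling (merge each cell with its up/left neighbours' classes).

-- ===== PORT A =====
def get_plant_positions (field : List String) (plant : String) : List (Int × Int) :=
  (PySem.List.enumerate field).foldl (fun positions irow =>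
    (PySem.List.enumerate irow.2.toList).foldl (fun positions jc =>
      if [jc.2] = plant.toList then positions ++ [(irow.1, jc.1)] else positions) positions) []

def pvDirections : List (Int × Int) := [(-1, 0), (1, 0), (0, -1), (0, 1)]

-- fuel (positions.length + 1) only makes the while-loop total; it provably exceeds the
-- number of iterations Python performs, and exhaustion returns the same state as the empty-queue exit.
def pvBfsLoop (positions : List (Int × Int)) :
    List (Int × Int) → PySem.Set (Int × Int) → PySem.Set (Int × Int) → Nat →
    PySem.Set (Int × Int) × PySem.Set (Int × Int)
  | _, visited, region, 0 => (visited, region)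
  | [], visited, region, _ + 1 => (visited, region)
  | c :: queue, visited, region, fuel + 1 =>
      let st := pvDirections.foldl
        (fun (st : List (Int × Int) × PySem.Set (Int × Int) × PySem.Set (Int × Int)) d =>
          if (c.1 + d.1, c.2 + d.2) ∈ positions ∧ (c.1 + d.1, c.2 + d.2) ∉ st.2.1 then
            (st.1 ++ [(c.1 + d.1, c.2 + d.2)], PySem.Set.add st.2.1 (c.1 + d.1, c.2 + d.2),
             PySem.Set.add st.2.2 (c.1 + d.1, c.2 + d.2))
          else st) (queue, visited, region)
      pvBfsLoop positions st.1 st.2.1 st.2.2 fuel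

def pvBfs (positions : List (Int × Int)) (start : Int × Int) (visited : PySem.Set (Int × Int)) :
    PySem.Set (Int × Int) × PySem.Set (Int × Int) :=
  pvBfsLoop positions [start] (PySem.Set.add visited start) (PySem.Set.ofList [start])
    (positions.length + 1)

-- Python's iteration order over a set is not modelled (PySem): each returned region set is
-- represented by its distinct elements listed in grid (row-major) order — exact as a finite set.
def get_regions (field : List String) (plant : String) : List (List (Int × Int)) :=
  let plant_positions := get_plant_positions field plant
  ((plant_positions.foldl
    (fun (st : List (List (Int × Int)) × PySem.Set (Int × Int)) position =>
      if position ∉ st.2 then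
        let r := pvBfs plant_positions position st.2
        (st.1 ++ [r.2], r.1)
      else st) ([], PySem.Set.empty)).1).map
    (fun r => plant_positions.filter (fun q => decide (q ∈ r)))

-- ===== PORT B =====
def pvPositions (field : List String) (plant : String) : List (Int × Int) :=
  (PySem.List.enumerate field).flatMap (fun irow =>
    ((PySem.List.enumerate irow.2.toList).filter (fun jc => decide ([jc.2] = plant.toList))).map
      (fun jc => (irow.1, jc.1)))

def pvRoots (label : PySem.Dict (Int × Int) (Int × Int)) (p : Int × Int) : List (Int × Int) :=
  [(p.1 - 1, p.2), (p.1, p.2 - 1)].foldl (fun roots q =>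
    match label.get? q with
    | some r => if r ∈ roots then roots else roots ++ [r]
    | none => roots) []

def pvUFStep (st : PySem.Dict (Int × Int) (Int × Int) × PySem.Dict (Int × Int) (List (Int × Int)))
    (p : Int × Int) :
    PySem.Dict (Int × Int) (Int × Int) × PySem.Dict (Int × Int) (List (Int × Int)) :=
  match pvRoots st.1 p with
  | [] => (st.1.insert p p, st.2.insert p [p])
  | r0 :: rs =>
      -- r = min(roots): roots is nonempty, so min2? is `some`; getD only for totality
      let r := (PySem.List.min2? (r0 :: rs) Prod.fst Prod.snd).getD p
      (r0 :: rs).foldl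
        (fun st r2 =>
          if r2 = r then st
          else
            -- members.pop(r2): the key is always present here, so pop = lookup + erase
            let g2 := st.2.getD r2 []
            g2.foldl (fun st q => (st.1.insert q r, st.2.modify r [] (fun g => g ++ [q])))
              (st.1, st.2.erase r2))
        (st.1.insert p r, st.2.modify r [] (fun g => g ++ [p]))

-- Python's iteration order over a set is not modelled (PySem): each returned region set is
-- represented by its distinct elements listed in grid (row-major) order — exact as a finite set.
def get_regions_alt (field : List String) (plant : String) : List (List (Int × Int)) :=
  let positions := pvPositions field plant
  let st := positions.foldl pvUFStep (PySem.Dict.empty, PySem.Dict.empty)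
  st.2.values.map (fun g => positions.filter (fun q => decide (q ∈ PySem.Set.ofList g)))

-- ===== PRECONDITION & SPEC =====
def Spec_get_regions (field : List String) (plant : String) (out : List (List (Int × Int))) : Prop := out = get_regions_alt field plant
instance (field : List String) (plant : String) (out : List (List (Int × Int))) : Decidable (Spec_get_regions field plant out) := by unfold Spec_get_regions; infer_instance

-- ===== CLAIM (what is proved, stated in full; the proofs are below) =====
def Claim_equal_get_regions : Prop := ∀ (field : List String) (plant : String), Dom_get_regions field plant → Spec_get_regions field plant (get_regions field plant)

-- ===== LEMMAS AND PROOFS =====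

-- Lexicographic (row-major) order on cells, and grid adjacency.
def pvLt (a b : Int × Int) : Prop := a.1 < b.1 ∨ (a.1 = b.1 ∧ a.2 < b.2)

def pvAdjP (a b : Int × Int) : Prop := (a.1 - b.1).natAbs + (a.2 - b.2).natAbs = 1

-- One edge of the plant graph: both endpoints are plant cells and they are grid-adjacent.
def pvStepR (S : List (Int × Int)) (a b : Int × Int) : Prop := a ∈ S ∧ b ∈ S ∧ pvAdjP a b

-- Connectivity in the plant graph.
def pvConn (S : List (Int × Int)) (a b : Int × Int) : Prop := Relation.ReflTransGen (pvStepR S) a b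

lemma pvLt_irrefl (a : Int × Int) : ¬ pvLt a a := by unfold pvLt; omega

lemma pvLt_trans {a b c : Int × Int} (h1 : pvLt a b) (h2 : pvLt b c) : pvLt a c := by
  rcases h1 with h1 | h1 <;> rcases h2 with h2 | h2 <;> simp [pvLt] <;> omega

lemma pvLt_asymm {a b : Int × Int} (h : pvLt a b) : ¬ pvLt b a :=
  fun h2 => pvLt_irrefl a (pvLt_trans h h2)

lemma pvLt_total (a b : Int × Int) : pvLt a b ∨ a = b ∨ pvLt b a := by
  rcases a with ⟨a1, a2⟩; rcases b with ⟨b1, b2⟩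
  simp [pvLt, Prod.ext_iff]; omega

lemma pvLt_ne {a b : Int × Int} (h : pvLt a b) : a ≠ b := by
  rintro rfl; exact pvLt_irrefl a h

lemma pvAdjP_symm {a b : Int × Int} (h : pvAdjP a b) : pvAdjP b a := by
  unfold pvAdjP at *; omega

lemma pvStepR_symm {S : List (Int × Int)} {a b : Int × Int} (h : pvStepR S a b) : pvStepR S b a :=
  ⟨h.2.1, h.1, pvAdjP_symm h.2.2⟩

lemma pvConn_trans {S : List (Int × Int)} {a b c : Int × Int}
    (h1 : pvConn S a b) (h2 : pvConn S b c) : pvConn S a c := h1.trans h2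

lemma pvConn_symm {S : List (Int × Int)} {a b : Int × Int} (h : pvConn S a b) : pvConn S b a := by
  induction h with
  | refl => exact Relation.ReflTransGen.refl
  | tail _ hstep ih =>
      exact Relation.ReflTransGen.trans (Relation.ReflTransGen.single (pvStepR_symm hstep)) ih

lemma pvConn_mono {S T : List (Int × Int)} (hsub : ∀ x, x ∈ S → x ∈ T)
    {a b : Int × Int} (h : pvConn S a b) : pvConn T a b := by
  induction h with
  | refl => exact Relation.ReflTransGen.refl
  | tail _ hstep ih => exact ih.tail ⟨hsub _ hstep.1, hsub _ hstep.2.1, hstep.2.2⟩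

lemma pvConn_mem {S : List (Int × Int)} {a b : Int × Int} (h : pvConn S a b) :
    b = a ∨ b ∈ S := by
  induction h with
  | refl => exact Or.inl rfl
  | tail _ hstep _ => exact Or.inr hstep.2.1

-- A set closed under edges contains the whole component of each of its elements.
lemma pvClosed_conn {S C : List (Int × Int)}
    (hC : ∀ a b, a ∈ C → pvStepR S a b → b ∈ C)
    {a b : Int × Int} (ha : a ∈ C) (h : pvConn S a b) : b ∈ C := by
  induction h with
  | refl => exact ha
  | tail _ hstep ih => exact hC _ _ ih hstep

-- The four BFS direction offsets reach exactly the grid-adjacent cells.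
lemma pvAdj_iff_mem_dirs (c b : Int × Int) :
    pvAdjP c b ↔ b ∈ pvDirections.map (fun d => (c.1 + d.1, c.2 + d.2)) := by
  rcases c with ⟨x, y⟩; rcases b with ⟨u, v⟩
  simp [pvAdjP, pvDirections, Prod.ext_iff]
  omega

-- An adjacent cell that is row-major-smaller is the up or the left neighbour.
lemma pvAdj_lt_cases {p q : Int × Int} (hadj : pvAdjP p q) (hlt : pvLt q p) :
    q = (p.1 - 1, p.2) ∨ q = (p.1, p.2 - 1) := by
  rcases p with ⟨x, y⟩; rcases q with ⟨u, v⟩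
  simp [pvAdjP] at hadj
  simp [pvLt] at hlt
  simp [Prod.ext_iff]
  omega

-- A's nested append loops compute exactly B's comprehension.
lemma pv_positions_eq (field : List String) (plant : String) :
    get_plant_positions field plant = pvPositions field plant := by
  unfold get_plant_positions pvPositions
  have h : ∀ (irow : Int × String) (acc : List (Int × Int)),
      (PySem.List.enumerate irow.2.toList).foldl (fun positions jc =>
        if [jc.2] = plant.toList then positions ++ [(irow.1, jc.1)] else positions) acc
      = acc ++ ((PySem.List.enumerate irow.2.toList).filter
            (fun jc => decide ([jc.2] = plant.toList))).map (fun jc => (irow.1, jc.1)) := by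
    intro irow acc
    exact PySem.List.foldl_append_ite (fun jc : Int × Char => [jc.2] = plant.toList) _ _ _
  simp only [h]
  rw [PySem.List.foldl_append_eq_flatMap]
  simp

-- The plant positions come out in strictly increasing row-major order.
lemma pv_nodup_snoc {l : List (Int × Int)} {x : Int × Int} (h : l.Nodup) (hx : x ∉ l) :
    (l ++ [x]).Nodup := by
  refine List.Nodup.append h (List.nodup_singleton x) ?_
  intro a ha hax
  simp at hax
  subst hax
  exact hx ha

lemma pvPositions_pairwise (field : List String) (plant : String) :
    (pvPositions field plant).Pairwise pvLt := by
  unfold pvPositions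
  rw [List.flatMap_def]
  refine List.pairwise_flatten.2 ⟨?_, ?_⟩
  · intro l' hl'
    simp only [List.mem_map] at hl'
    obtain ⟨irow, _, rfl⟩ := hl'
    refine List.pairwise_map.2 ?_
    have hpw := (PySem.List.pairwise_lt_enumerate irow.2.toList 0).filter
      (fun jc => decide ([jc.2] = plant.toList))
    exact hpw.imp (fun h => Or.inr ⟨rfl, h⟩)
  · refine List.pairwise_map.2 ?_
    refine (PySem.List.pairwise_lt_enumerate field 0).imp ?_
    intro a b hab x hx y hy
    simp only [List.mem_map, List.mem_filter] at hx hy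
    obtain ⟨jc, _, rfl⟩ := hx
    obtain ⟨jc', _, rfl⟩ := hy
    exact Or.inl hab

lemma pv_set_add_fresh (s : PySem.Set (Int × Int)) (x : Int × Int) (h : x ∉ s) :
    PySem.Set.add s x = s ++ [x] := by
  simp [PySem.Set.add, PySem.Set.contains, h]

-- ---------- BFS side ----------

-- Number of plant cells not yet visited (with multiplicity removed): the loop measure.
def pvUnseen (positions visited : List (Int × Int)) : Nat :=
  (PySem.List.dedup positions).countP (fun x => decide (x ∉ visited))

lemma pv_countP_insert_one {L v : List (Int × Int)} {b : Int × Int}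
    (hnd : L.Nodup) (hbL : b ∈ L) (hbv : b ∉ v) :
    L.countP (fun x => decide (x ∉ v ++ [b])) + 1 = L.countP (fun x => decide (x ∉ v)) := by
  induction L with
  | nil => cases hbL
  | cons x t ih =>
      rw [List.nodup_cons] at hnd
      rw [List.countP_cons, List.countP_cons]
      rcases List.mem_cons.1 hbL with rfl | hbt
      · have h1 : (decide (b ∉ v ++ [b])) = false := by simp
        have h2 : (decide (b ∉ v)) = true := by simp [hbv]
        have hcong : t.countP (fun x => decide (x ∉ v ++ [b])) = t.countP (fun x => decide (x ∉ v)) := by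
          refine List.countP_congr ?_
          intro y hy
          have hyb : y ≠ b := fun h => hnd.1 (h ▸ hy)
          simp [hyb]
        rw [h1, h2, hcong]
        simp
      · have hxb : x ≠ b := fun h => hnd.1 (h ▸ hbt)
        have hiff : (decide (x ∉ v ++ [b])) = (decide (x ∉ v)) := by simp [hxb]
        rw [hiff]
        have hih := ih hnd.2 hbt
        omega

lemma pv_countP_insert {L v Δ : List (Int × Int)} (hnd : L.Nodup) (hΔ : Δ.Nodup)
    (hsub : ∀ b ∈ Δ, b ∈ L ∧ b ∉ v) :
    L.countP (fun x => decide (x ∉ v ++ Δ)) + Δ.length = L.countP (fun x => decide (x ∉ v)) := by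
  induction Δ generalizing v with
  | nil =>
      rw [List.append_nil]
      rfl
  | cons b Δ ih =>
      rw [List.nodup_cons] at hΔ
      have h1 := pv_countP_insert_one hnd (hsub b (List.mem_cons_self)).1 (hsub b (List.mem_cons_self)).2
      have h2 := ih hΔ.2 (fun b' hb' => ⟨(hsub b' (List.mem_cons_of_mem _ hb')).1, by
        have hne : b' ≠ b := fun h => hΔ.1 (h ▸ hb')
        have hnv := (hsub b' (List.mem_cons_of_mem _ hb')).2
        intro hc
        rcases List.mem_append.1 hc with hcv | hcb
        · exact hnv hcv
        · exact hne (List.mem_singleton.1 hcb)⟩)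
      have heq : v ++ b :: Δ = (v ++ [b]) ++ Δ := by simp
      rw [heq]
      simp only [List.length_cons]
      omega

lemma pv_dedup_length_le (xs : List (Int × Int)) :
    (PySem.List.dedup xs).length ≤ xs.length := by
  have h : ∀ (ys : List (Int × Int)) (acc : PySem.Set (Int × Int)),
      (ys.foldl PySem.Set.add acc).length ≤ acc.length + ys.length := by
    intro ys
    induction ys with
    | nil => simp
    | cons y ys ih =>
        intro acc
        have h2 : (PySem.Set.add acc y).length ≤ acc.length + 1 := by
          unfold PySem.Set.add
          split
          · omega
          · simp
        calc ((y :: ys).foldl PySem.Set.add acc).length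
            = (ys.foldl PySem.Set.add (PySem.Set.add acc y)).length := by simp
          _ ≤ (PySem.Set.add acc y).length + ys.length := ih _
          _ ≤ acc.length + (y :: ys).length := by simp; omega
  simpa [PySem.List.dedup, PySem.Set.ofList, PySem.Set.empty] using h xs []

-- One dequeued cell: the fold over the four directions appends the fresh neighbours Δ
-- to queue, visited and region alike, and afterwards every neighbour is visited.
lemma pv_dirfold' (positions : List (Int × Int)) (c : Int × Int) :
    ∀ (ds q rl V0 : List (Int × Int)), (V0 ++ rl).Nodup →
    ∃ Δ : List (Int × Int),
      (ds.foldl (fun (st : List (Int × Int) × PySem.Set (Int × Int) × PySem.Set (Int × Int)) d =>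
          if (c.1 + d.1, c.2 + d.2) ∈ positions ∧ (c.1 + d.1, c.2 + d.2) ∉ st.2.1 then
            (st.1 ++ [(c.1 + d.1, c.2 + d.2)], PySem.Set.add st.2.1 (c.1 + d.1, c.2 + d.2),
             PySem.Set.add st.2.2 (c.1 + d.1, c.2 + d.2))
          else st) (q, V0 ++ rl, rl))
        = (q ++ Δ, V0 ++ (rl ++ Δ), rl ++ Δ)
      ∧ (V0 ++ (rl ++ Δ)).Nodup
      ∧ (∀ b ∈ Δ, (∃ d ∈ ds, b = (c.1 + d.1, c.2 + d.2)) ∧ b ∈ positions ∧ b ∉ V0 ++ rl)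
      ∧ (∀ d ∈ ds, (c.1 + d.1, c.2 + d.2) ∈ positions → (c.1 + d.1, c.2 + d.2) ∈ V0 ++ (rl ++ Δ)) := by
  intro ds
  induction ds with
  | nil =>
      intro q rl V0 hnd
      exact ⟨[], by simp, by simpa using hnd, by simp, by simp⟩
  | cons d0 ds ih =>
      intro q rl V0 hnd
      simp only [List.foldl_cons]
      by_cases hmem : (c.1 + d0.1, c.2 + d0.2) ∈ positions ∧ (c.1 + d0.1, c.2 + d0.2) ∉ V0 ++ rl
      · have hfresh2 : (c.1 + d0.1, c.2 + d0.2) ∉ rl :=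
          fun h => hmem.2 (List.mem_append.2 (Or.inr h))
        have hadd1 : PySem.Set.add (V0 ++ rl) (c.1 + d0.1, c.2 + d0.2)
            = V0 ++ (rl ++ [(c.1 + d0.1, c.2 + d0.2)]) := by
          rw [pv_set_add_fresh _ _ hmem.2, List.append_assoc]
        have hadd2 : PySem.Set.add rl (c.1 + d0.1, c.2 + d0.2)
            = rl ++ [(c.1 + d0.1, c.2 + d0.2)] := pv_set_add_fresh _ _ hfresh2
        have hnd' : (V0 ++ (rl ++ [(c.1 + d0.1, c.2 + d0.2)])).Nodup := by
          rw [← List.append_assoc]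
          exact pv_nodup_snoc hnd hmem.2
        rw [if_pos hmem, hadd1, hadd2]
        obtain ⟨Δ, heq, hnd2, hfr, hcov⟩ := ih (q ++ [(c.1 + d0.1, c.2 + d0.2)])
          (rl ++ [(c.1 + d0.1, c.2 + d0.2)]) V0 hnd'
        refine ⟨(c.1 + d0.1, c.2 + d0.2) :: Δ, ?_, ?_, ?_, ?_⟩
        · rw [heq]
          simp
        · simpa [List.append_assoc] using hnd2
        · intro b hb
          rcases List.mem_cons.1 hb with rfl | hb2
          · exact ⟨⟨d0, List.mem_cons_self, rfl⟩, hmem.1, hmem.2⟩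
          · obtain ⟨⟨d, hd, hbd⟩, h2, h3⟩ := hfr b hb2
            refine ⟨⟨d, List.mem_cons_of_mem _ hd, hbd⟩, h2, fun hc => h3 ?_⟩
            rcases List.mem_append.1 hc with h | h
            · exact List.mem_append.2 (Or.inl h)
            · exact List.mem_append.2 (Or.inr (List.mem_append.2 (Or.inl h)))
        · intro d hd hpos
          rcases List.mem_cons.1 hd with rfl | hd2
          · exact List.mem_append.2 (Or.inr (List.mem_append.2 (Or.inr List.mem_cons_self)))
          · simpa [List.append_assoc] using hcov d hd2 hpos
      · rw [if_neg hmem]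
        obtain ⟨Δ, heq, hnd2, hfr, hcov⟩ := ih q rl V0 hnd
        refine ⟨Δ, heq, hnd2, ?_, ?_⟩
        · intro b hb
          obtain ⟨⟨d, hd, hbd⟩, h2, h3⟩ := hfr b hb
          exact ⟨⟨d, List.mem_cons_of_mem _ hd, hbd⟩, h2, h3⟩
        · intro d hd hpos
          rcases List.mem_cons.1 hd with rfl | hd2
          · have hbin : (c.1 + d.1, c.2 + d.2) ∈ V0 ++ rl := by
              by_contra hc
              exact hmem ⟨hpos, hc⟩
            rcases List.mem_append.1 hbin with h | h
            · exact List.mem_append.2 (Or.inl h)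
            · exact List.mem_append.2 (Or.inr (List.mem_append.2 (Or.inl h)))
          · exact hcov d hd2 hpos

-- Full BFS loop: starting from a queue inside the region, the loop returns
-- visited = V0 ++ R and region = R with R exactly grown by fresh connected cells,
-- and on exit the whole of V0 ++ R is closed under plant-graph edges.
lemma pvBfsLoop_spec (positions : List (Int × Int)) (start : Int × Int) :
    ∀ (fuel : Nat) (queue rl V0 : List (Int × Int)),
    (V0 ++ rl).Nodup →
    (∀ a b, a ∈ V0 → pvStepR positions a b → b ∈ V0) →
    (∀ a ∈ rl, a ∈ positions) →
    (∀ a ∈ queue, a ∈ rl) →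
    (∀ a, a ∈ rl → a ∉ queue → ∀ b, b ∈ positions → pvAdjP a b → b ∈ V0 ++ rl) →
    (∀ a ∈ rl, pvConn positions start a) →
    queue.length + pvUnseen positions (V0 ++ rl) ≤ fuel →
    ∃ R, pvBfsLoop positions queue (V0 ++ rl) rl fuel = (V0 ++ R, R)
      ∧ (∀ a ∈ rl, a ∈ R)
      ∧ (V0 ++ R).Nodup
      ∧ (∀ a ∈ R, a ∈ positions)
      ∧ (∀ a ∈ R, pvConn positions start a)
      ∧ (∀ a b, a ∈ V0 ++ R → pvStepR positions a b → b ∈ V0 ++ R) := by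
  intro fuel
  induction fuel with
  | zero =>
      intro queue rl V0 hnd hV0 hrlpos hqrl hclo hconn hm
      have hq : queue = [] := by
        cases queue with
        | nil => rfl
        | cons c t => simp at hm
      subst hq
      refine ⟨rl, rfl, fun a ha => ha, hnd, hrlpos, hconn, ?_⟩
      intro a b hab hstep
      rcases List.mem_append.1 hab with h | h
      · exact List.mem_append.2 (Or.inl (hV0 a b h hstep))
      · exact hclo a h (List.not_mem_nil) b hstep.2.1 hstep.2.2
  | succ fuel ih =>
      intro queue rl V0 hnd hV0 hrlpos hqrl hclo hconn hm
      rcases queue with _ | ⟨c, queue'⟩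
      · refine ⟨rl, rfl, fun a ha => ha, hnd, hrlpos, hconn, ?_⟩
        intro a b hab hstep
        rcases List.mem_append.1 hab with h | h
        · exact List.mem_append.2 (Or.inl (hV0 a b h hstep))
        · exact hclo a h (List.not_mem_nil) b hstep.2.1 hstep.2.2
      · have hcrl : c ∈ rl := hqrl c List.mem_cons_self
        have hcpos : c ∈ positions := hrlpos c hcrl
        obtain ⟨Δ, heq, hnd', hfr, hcov⟩ := pv_dirfold' positions c pvDirections queue' rl V0 hnd
        rw [pvBfsLoop]
        simp only [heq]
        have hΔnd : Δ.Nodup :=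
          ((List.nodup_append.1 ((List.nodup_append.1 hnd').2.1)).2.1)
        have hme : pvUnseen positions (V0 ++ (rl ++ Δ)) + Δ.length
            = pvUnseen positions (V0 ++ rl) := by
          unfold pvUnseen
          have hc := pv_countP_insert (L := PySem.List.dedup positions) (v := V0 ++ rl) (Δ := Δ)
            (PySem.List.nodup_dedup positions) hΔnd
            (fun b hb => ⟨(PySem.List.mem_dedup positions b).2 (hfr b hb).2.1, (hfr b hb).2.2⟩)
          rw [← hc]
          simp [List.append_assoc]
        have hpos' : ∀ a ∈ rl ++ Δ, a ∈ positions := by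
          intro a ha
          rcases List.mem_append.1 ha with h | h
          · exact hrlpos a h
          · exact (hfr a h).2.1
        have hq' : ∀ a ∈ queue' ++ Δ, a ∈ rl ++ Δ := by
          intro a ha
          rcases List.mem_append.1 ha with h | h
          · exact List.mem_append.2 (Or.inl (hqrl a (List.mem_cons_of_mem _ h)))
          · exact List.mem_append.2 (Or.inr h)
        have hclo' : ∀ a, a ∈ rl ++ Δ → a ∉ queue' ++ Δ → ∀ b, b ∈ positions → pvAdjP a b →
            b ∈ V0 ++ (rl ++ Δ) := by
          intro a ha hnq b hbpos hadj
          rcases List.mem_append.1 ha with ha2 | ha2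
          · by_cases hac : a = c
            · subst hac
              have hbmem := (pvAdj_iff_mem_dirs a b).1 hadj
              obtain ⟨d, hd, rfl⟩ := List.mem_map.1 hbmem
              exact hcov d hd hbpos
            · have hnq' : a ∉ c :: queue' := by
                intro h
                rcases List.mem_cons.1 h with h | h
                · exact hac h
                · exact hnq (List.mem_append.2 (Or.inl h))
              have hb := hclo a ha2 hnq' b hbpos hadj
              rcases List.mem_append.1 hb with h | h
              · exact List.mem_append.2 (Or.inl h)
              · exact List.mem_append.2 (Or.inr (List.mem_append.2 (Or.inl h)))
          · exact absurd (List.mem_append.2 (Or.inr ha2)) hnq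
        have hconn' : ∀ a ∈ rl ++ Δ, pvConn positions start a := by
          intro a ha
          rcases List.mem_append.1 ha with h | h
          · exact hconn a h
          · obtain ⟨⟨d, hd, rfl⟩, hpos, _⟩ := hfr a h
            exact (hconn c hcrl).tail
              ⟨hcpos, hpos, (pvAdj_iff_mem_dirs c _).2 (List.mem_map.2 ⟨d, hd, rfl⟩)⟩
        have hm' : (queue' ++ Δ).length + pvUnseen positions (V0 ++ (rl ++ Δ)) ≤ fuel := by
          simp only [List.length_append]
          simp only [List.length_cons] at hm
          omega
        obtain ⟨R, hres, hsub, h1, h2, h3, h4⟩ :=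
          ih (queue' ++ Δ) (rl ++ Δ) V0 hnd' hV0 hpos' hq' hclo' hconn' hm'
        exact ⟨R, hres, fun a ha => hsub a (List.mem_append.2 (Or.inl ha)), h1, h2, h3, h4⟩

-- Whole BFS call: it returns visited = V0 ++ R where R is exactly the connected
-- component of start, provided V0 is a union of components not containing start.
lemma pvBfs_spec (positions : List (Int × Int)) (start : Int × Int) (V0 : List (Int × Int))
    (hnd : V0.Nodup) (hstart : start ∈ positions) (hfresh : start ∉ V0)
    (hclosed : ∀ a b, a ∈ V0 → pvStepR positions a b → b ∈ V0) :
    ∃ R, pvBfs positions start V0 = (V0 ++ R, R)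
      ∧ (V0 ++ R).Nodup
      ∧ start ∈ R
      ∧ (∀ a, a ∈ R ↔ pvConn positions start a)
      ∧ (∀ a ∈ R, a ∈ positions)
      ∧ (∀ a b, a ∈ V0 ++ R → pvStepR positions a b → b ∈ V0 ++ R) := by
  have h0 : PySem.Set.ofList [start] = [start] := rfl
  have hadd : PySem.Set.add V0 start = V0 ++ [start] := pv_set_add_fresh V0 start hfresh
  have hnd1 : (V0 ++ [start]).Nodup := pv_nodup_snoc hnd hfresh
  have hmeas : [start].length + pvUnseen positions (V0 ++ [start]) ≤ positions.length + 1 := by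
    have h1 : pvUnseen positions (V0 ++ [start]) ≤ (PySem.List.dedup positions).length :=
      List.countP_le_length
    have h2 := pv_dedup_length_le positions
    simp only [List.length_singleton]
    omega
  obtain ⟨R, hres, hsubR, hnd2, hpos2, hconn2, hclo2⟩ :=
    pvBfsLoop_spec positions start (positions.length + 1) [start] [start] V0 hnd1 hclosed
      (by intro a ha; rw [List.mem_singleton] at ha; subst ha; exact hstart)
      (fun a ha => ha)
      (by
        intro a ha hna
        rw [List.mem_singleton] at ha
        subst ha
        exact absurd List.mem_cons_self hna)
      (by
        intro a ha
        rw [List.mem_singleton] at ha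
        subst ha
        exact Relation.ReflTransGen.refl)
      hmeas
  refine ⟨R, ?_, hnd2, hsubR start List.mem_cons_self, ?_, hpos2, hclo2⟩
  · unfold pvBfs
    rw [h0, hadd]
    exact hres
  · intro a
    refine ⟨hconn2 a, ?_⟩
    intro hca
    have hRclosed : ∀ x b, x ∈ R → pvStepR positions x b → b ∈ R := by
      intro x b hx hstep
      have hb := hclo2 x b (List.mem_append.2 (Or.inr hx)) hstep
      rcases List.mem_append.1 hb with hbV | hbR
      · have hxV := hclosed b x hbV (pvStepR_symm hstep)
        have hdisj := List.disjoint_of_nodup_append hnd2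
        exact (hdisj hxV hx).elim
      · exact hbR
    exact pvClosed_conn hRclosed (hsubR start List.mem_cons_self) hca

-- Invariant of A's outer loop after the prefix `pre` of positions has been processed.
def pvInvA (positions pre : List (Int × Int))
    (st : List (List (Int × Int)) × PySem.Set (Int × Int)) : Prop :=
  st.2 = st.1.flatten
  ∧ st.2.Nodup
  ∧ (∀ a ∈ st.2, a ∈ positions)
  ∧ (∀ a b, a ∈ st.2 → pvStepR positions a b → b ∈ st.2)
  ∧ (∀ p ∈ pre, p ∈ st.2)
  ∧ ∃ reps : List (Int × Int),
      (∀ r ∈ reps, r ∈ pre)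
      ∧ reps.Pairwise pvLt
      ∧ reps.length = st.1.length
      ∧ (∀ pr ∈ reps.zip st.1,
          (∀ a, a ∈ pr.2 ↔ pvConn positions pr.1 a)
          ∧ (∀ q, pvConn positions pr.1 q → ¬ pvLt q pr.1))

lemma pvA_fold (positions : List (Int × Int)) (hpw : positions.Pairwise pvLt) :
    ∀ (rest pre : List (Int × Int)) st, positions = pre ++ rest → pvInvA positions pre st →
    pvInvA positions positions
      (rest.foldl (fun (st : List (List (Int × Int)) × PySem.Set (Int × Int)) position =>
        if position ∉ st.2 then
          let r := pvBfs positions position st.2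
          (st.1 ++ [r.2], r.1)
        else st) st) := by
  intro rest
  induction rest with
  | nil =>
      intro pre st heq hInv
      rw [List.foldl_nil]
      have hpre : pre = positions := by simpa using heq.symm
      rwa [hpre] at hInv
  | cons p rest ih =>
      intro pre st heq hInv
      rw [List.foldl_cons]
      have heq' : positions = (pre ++ [p]) ++ rest := by simpa using heq
      refine ih (pre ++ [p]) _ heq' ?_
      obtain ⟨hflat, hnd, hpos, hclo, htouch, reps, hrpre, hrpw, hlen, hzip⟩ := hInv
      by_cases hpv : p ∈ st.2
      · rw [if_neg (not_not_intro hpv)]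
        refine ⟨hflat, hnd, hpos, hclo, ?_, reps, ?_, hrpw, hlen, hzip⟩
        · intro x hx
          rcases List.mem_append.1 hx with h | h
          · exact htouch x h
          · rw [List.mem_singleton] at h
            subst h
            exact hpv
        · exact fun r hr => List.mem_append.2 (Or.inl (hrpre r hr))
      · rw [if_pos hpv]
        have hppos : p ∈ positions := by
          rw [heq]
          exact List.mem_append.2 (Or.inr List.mem_cons_self)
        obtain ⟨R, hres, hndVR, hstartR, hchar, hRpos, hcloVR⟩ :=
          pvBfs_spec positions p st.2 hnd hppos hpv hclo
        show pvInvA positions (pre ++ [p])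
          (st.1 ++ [(pvBfs positions p st.2).2], (pvBfs positions p st.2).1)
        rw [hres]
        have hltpre : ∀ q ∈ pre, pvLt q p := by
          have hp2 := heq ▸ hpw
          have h3 := (List.pairwise_append.1 hp2).2.2
          exact fun q hq => h3 q hq p List.mem_cons_self
        have hprest : ∀ q ∈ rest, pvLt p q := by
          have hp2 := heq ▸ hpw
          have h3 := (List.pairwise_append.1 hp2).2.1
          exact (List.pairwise_cons.1 h3).1
        refine ⟨?_, hndVR, ?_, hcloVR, ?_, reps ++ [p], ?_, ?_, ?_, ?_⟩
        · show st.2 ++ R = (st.1 ++ [R]).flatten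
          rw [List.flatten_append, hflat]
          simp
        · intro a ha
          rcases List.mem_append.1 ha with h | h
          · exact hpos a h
          · exact hRpos a h
        · intro x hx
          rcases List.mem_append.1 hx with h | h
          · exact List.mem_append.2 (Or.inl (htouch x h))
          · rw [List.mem_singleton] at h
            subst h
            exact List.mem_append.2 (Or.inr hstartR)
        · intro r hr
          rcases List.mem_append.1 hr with h | h
          · exact List.mem_append.2 (Or.inl (hrpre r h))
          · exact List.mem_append.2 (Or.inr h)
        · refine List.pairwise_append.2 ⟨hrpw, List.pairwise_singleton _ _, ?_⟩
          intro a ha b hb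
          rw [List.mem_singleton] at hb
          subst hb
          exact hltpre a (hrpre a ha)
        · simp [hlen]
        · intro pr hpr
          rw [List.zip_append hlen] at hpr
          rcases List.mem_append.1 hpr with h | h
          · exact hzip pr h
          · simp only [List.zip_cons_cons, List.zip_nil_right, List.mem_singleton] at h
            subst h
            refine ⟨hchar, ?_⟩
            intro q hq hlt
            have hqnp : q ≠ p := pvLt_ne hlt
            have hqpos : q ∈ positions := by
              rcases pvConn_mem hq with h' | h'
              · exact absurd h' hqnp
              · exact h'
            have hqpre : q ∈ pre := by
              rw [heq] at hqpos
              rcases List.mem_append.1 hqpos with h' | h'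
              · exact h'
              · rcases List.mem_cons.1 h' with h'' | h''
                · exact absurd h'' hqnp
                · exact absurd hlt (pvLt_asymm (hprest q h''))
            exact hpv (pvClosed_conn hclo (htouch q hqpre) (pvConn_symm hq))

-- ---------- union-by-relabel side ----------

-- Dict helper lemmas (all PySem.Dict definitions are transparent).
lemma pv_get?_erase_self (d : PySem.Dict (Int × Int) (List (Int × Int))) (k : Int × Int) :
    (d.erase k).get? k = none := by
  rcases d with ⟨items⟩
  simp only [PySem.Dict.erase, PySem.Dict.get?, Option.map_eq_none_iff, List.find?_eq_none]
  intro p hp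
  have := List.of_mem_filter hp
  simpa using this

lemma pv_get?_erase_ne (d : PySem.Dict (Int × Int) (List (Int × Int))) (k k' : Int × Int)
    (h : k' ≠ k) : (d.erase k).get? k' = d.get? k' := by
  rcases d with ⟨items⟩
  simp only [PySem.Dict.erase, PySem.Dict.get?]
  congr 1
  induction items with
  | nil => rfl
  | cons p t ih =>
      by_cases hpk : p.1 = k
      · have h1 : (p.1 == k) = true := by simp [hpk]
        have h2 : (p.1 == k') = false := by simp [hpk]; exact fun h' => absurd (h'.symm) h
        simp [h1, List.find?, h2, ih]
      · have h1 : (p.1 == k) = false := by simp [hpk]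
        simp only [List.filter_cons, h1, Bool.not_false, if_true]
        by_cases hpk' : p.1 = k'
        · simp [List.find?, hpk']
        · have h2 : (p.1 == k') = false := by simp [hpk']
          simp [List.find?, h2, ih]

lemma pv_keys_erase (d : PySem.Dict (Int × Int) (List (Int × Int))) (k : Int × Int) :
    (d.erase k).keys = d.keys.filter (fun x => x ≠ k) := by
  rcases d with ⟨items⟩
  simp only [PySem.Dict.erase, PySem.Dict.keys]
  induction items with
  | nil => rfl
  | cons p t ih =>
      by_cases hpk : p.1 = k
      · simp [hpk, ih]
      · have h1 : (p.1 == k) = false := by simp [hpk]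
        simp [h1, hpk, ih]

lemma pv_get?_modify_self (d : PySem.Dict (Int × Int) (List (Int × Int))) (k : Int × Int)
    (g : List (Int × Int)) (f : List (Int × Int) → List (Int × Int))
    (h : d.get? k = some g) : (d.modify k [] f).get? k = some (f g) := by
  have hg : d.getD k [] = g := PySem.Dict.getD_of_get?_eq_some d [] h
  simp [PySem.Dict.modify, hg]

lemma pv_get?_modify_ne (d : PySem.Dict (Int × Int) (List (Int × Int))) (k k' : Int × Int)
    (f : List (Int × Int) → List (Int × Int)) (h : k' ≠ k) :
    (d.modify k [] f).get? k' = d.get? k' := by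
  simp [PySem.Dict.modify, PySem.Dict.get?_insert, h]

lemma pv_keys_modify_of_mem (d : PySem.Dict (Int × Int) (List (Int × Int))) (k : Int × Int)
    (f : List (Int × Int) → List (Int × Int)) (h : k ∈ d.keys) :
    (d.modify k [] f).keys = d.keys := by
  rw [PySem.Dict.keys_modify]
  exact PySem.Dict.keys_insert_of_contains _ _ ((PySem.Dict.contains_iff_mem_keys _ _).2 h)

lemma pv_keys_insert_fresh (d : PySem.Dict (Int × Int) (List (Int × Int))) (k : Int × Int)
    (v : List (Int × Int)) (h : k ∉ d.keys) : (d.insert k v).keys = d.keys ++ [k] := by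
  have hc : d.contains k = false := by
    rcases hb : d.contains k
    · rfl
    · exact absurd ((PySem.Dict.contains_iff_mem_keys _ _).1 hb) h
  rw [PySem.Dict.keys, PySem.Dict.items_insert_of_not_contains _ _ hc]
  simp [PySem.Dict.keys]

lemma pv_get?_some_mem_keys {d : PySem.Dict (Int × Int) (List (Int × Int))} {k : Int × Int}
    {v : List (Int × Int)} (h : d.get? k = some v) : k ∈ d.keys := by
  exact PySem.Dict.mem_keys_of_mem_items _ (PySem.Dict.mem_items_of_get?_eq_some _ h)

-- min(roots) for a two-element list.
lemma pv_min2_pair (a b p : Int × Int) (hne : b ≠ a) :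
    ∃ r, (PySem.List.min2? [a, b] Prod.fst Prod.snd).getD p = r
      ∧ ((r = a ∧ pvLt a b) ∨ (r = b ∧ pvLt b a)) := by
  have hcic : (b.1 < a.1 ∨ b.1 ≤ a.1 ∧ b.2 < a.2) ↔ pvLt b a := by
    unfold pvLt
    omega
  by_cases hc : pvLt b a
  · refine ⟨b, ?_, Or.inr ⟨rfl, hc⟩⟩
    simp [PySem.List.min2?]
    rw [if_pos (hcic.2 hc)]
    rfl
  · have hab : pvLt a b := by
      rcases pvLt_total a b with h | h | h
      · exact h
      · exact absurd h.symm hne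
      · exact absurd h hc
    refine ⟨a, ?_, Or.inl ⟨rfl, hab⟩⟩
    simp [PySem.List.min2?]
    rw [if_neg (fun h => hc (hcic.1 h))]
    rfl

-- The merge loop over a popped class: labels get r, members of r grow by g2, rest untouched.
lemma pv_merge_fold (r : Int × Int) :
    ∀ (g2 : List (Int × Int)) (l : PySem.Dict (Int × Int) (Int × Int))
      (m : PySem.Dict (Int × Int) (List (Int × Int))) (g : List (Int × Int)),
    m.get? r = some g →
    ∃ l' m', (g2.foldl (fun st q => (st.1.insert q r, st.2.modify r [] (fun g => g ++ [q])))
        (l, m)) = (l', m')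
      ∧ (∀ x, x ∈ g2 → l'.get? x = some r)
      ∧ (∀ x, x ∉ g2 → l'.get? x = l.get? x)
      ∧ m'.get? r = some (g ++ g2)
      ∧ (∀ k, k ≠ r → m'.get? k = m.get? k)
      ∧ m'.keys = m.keys := by
  intro g2
  induction g2 with
  | nil =>
      intro l m g hg
      exact ⟨l, m, rfl, by simp, fun x _ => rfl, by simpa using hg, fun k _ => rfl, rfl⟩
  | cons q g2 ih =>
      intro l m g hg
      have hm1 : (m.modify r [] (fun g => g ++ [q])).get? r = some (g ++ [q]) :=
        pv_get?_modify_self m r g _ hg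
      obtain ⟨l', m', heq, h1, h2, h3, h4, h5⟩ := ih (l.insert q r) (m.modify r [] (fun g => g ++ [q])) (g ++ [q]) hm1
      refine ⟨l', m', by simpa using heq, ?_, ?_, ?_, ?_, ?_⟩
      · intro x hx
        rcases List.mem_cons.1 hx with rfl | hx2
        · by_cases hxg : x ∈ g2
          · exact h1 x hxg
          · rw [h2 x hxg, PySem.Dict.get?_insert]
            simp
        · exact h1 x hx2
      · intro x hx
        have hxq : x ≠ q := fun h => hx (h ▸ List.mem_cons_self)
        have hxg : x ∉ g2 := fun h => hx (List.mem_cons_of_mem _ h)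
        rw [h2 x hxg, PySem.Dict.get?_insert]
        simp [hxq]
      · rw [h3]
        simp
      · intro k hk
        rw [h4 k hk, pv_get?_modify_ne m r k _ hk]
      · rw [h5]
        exact pv_keys_modify_of_mem m r _ (pv_get?_some_mem_keys hg)

-- Invariant of B's single pass after the prefix `pre` of positions has been processed:
-- members is exactly the partition of pre into connected components of the graph induced
-- on pre, keyed and ordered by each component's row-major-least cell.
def pvInvB (pre : List (Int × Int))
    (st : PySem.Dict (Int × Int) (Int × Int) × PySem.Dict (Int × Int) (List (Int × Int))) : Prop :=
  (∀ q r, st.1.get? q = some r → q ∈ pre)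
  ∧ (∀ q ∈ pre, ∃ r g, st.1.get? q = some r ∧ st.2.get? r = some g ∧ q ∈ g)
  ∧ (st.2.keys).Pairwise pvLt
  ∧ (∀ r g, st.2.get? r = some g →
        r ∈ g
      ∧ (∀ a, a ∈ g ↔ pvConn pre r a)
      ∧ (∀ q, pvConn pre r q → ¬ pvLt q r)
      ∧ (∀ q ∈ g, st.1.get? q = some r))

lemma pvB_g_sub_pre {pre : List (Int × Int)}
    {st : PySem.Dict (Int × Int) (Int × Int) × PySem.Dict (Int × Int) (List (Int × Int))}
    (hInv : pvInvB pre st) {r : Int × Int} {g : List (Int × Int)}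
    (hg : st.2.get? r = some g) : ∀ a ∈ g, a ∈ pre := by
  intro a ha
  exact hInv.1 a r ((hInv.2.2.2 r g hg).2.2.2 a ha)

lemma pvB_key_pre {pre : List (Int × Int)}
    {st : PySem.Dict (Int × Int) (Int × Int) × PySem.Dict (Int × Int) (List (Int × Int))}
    (hInv : pvInvB pre st) {r : Int × Int} (hr : r ∈ st.2.keys) : r ∈ pre := by
  rcases ho : st.2.get? r with _ | g
  · exact absurd hr ((PySem.Dict.get?_eq_none_iff_not_mem_keys _ _).1 ho)
  · exact pvB_g_sub_pre hInv ho r (hInv.2.2.2 r g ho).1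

lemma pvB_label_class {pre : List (Int × Int)}
    {st : PySem.Dict (Int × Int) (Int × Int) × PySem.Dict (Int × Int) (List (Int × Int))}
    (hInv : pvInvB pre st) {q rq : Int × Int} (h : st.1.get? q = some rq) :
    ∃ g, st.2.get? rq = some g ∧ q ∈ g := by
  obtain ⟨r', g', h1, h2, h3⟩ := hInv.2.1 q (hInv.1 q rq h)
  rw [h] at h1
  have hEq := Option.some.inj h1
  subst hEq
  exact ⟨g', h2, h3⟩

lemma pvB_class_closed_step {pre : List (Int × Int)}
    {st : PySem.Dict (Int × Int) (Int × Int) × PySem.Dict (Int × Int) (List (Int × Int))}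
    (hInv : pvInvB pre st) {k : Int × Int} {g : List (Int × Int)}
    (hg : st.2.get? k = some g) {a b : Int × Int}
    (ha : a ∈ g) (hstep : pvStepR pre a b) : b ∈ g := by
  have hchar := (hInv.2.2.2 k g hg).2.1
  exact (hchar b).2 (((hchar a).1 ha).tail hstep)

lemma pvB_step_none (pre : List (Int × Int)) (p : Int × Int)
    (label : PySem.Dict (Int × Int) (Int × Int))
    (members : PySem.Dict (Int × Int) (List (Int × Int)))
    (hInv : pvInvB pre (label, members))
    (hltp : ∀ q ∈ pre, pvLt q p) (hnp : p ∉ pre)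
    (hnone : ∀ q, q ∈ pre → ¬ pvAdjP p q) :
    pvInvB (pre ++ [p]) (label.insert p p, members.insert p [p]) := by
  obtain ⟨hdom, hcomp, hkeys, hcls⟩ := hInv
  have hInv' : pvInvB pre (label, members) := ⟨hdom, hcomp, hkeys, hcls⟩
  have hmono : ∀ {x y : Int × Int}, pvConn pre x y → pvConn (pre ++ [p]) x y :=
    fun h => pvConn_mono (fun z hz => List.mem_append.2 (Or.inl hz)) h
  have hpkeys : p ∉ members.keys := fun h => hnp (pvB_key_pre hInv' h)
  refine ⟨?_, ?_, ?_, ?_⟩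
  · intro q rq h
    by_cases hqp : q = p
    · obtain rfl := hqp.symm
      exact List.mem_append.2 (Or.inr List.mem_cons_self)
    · rw [PySem.Dict.get?_insert, if_neg hqp] at h
      exact List.mem_append.2 (Or.inl (hdom q rq h))
  · intro q hq
    rcases List.mem_append.1 hq with hq | hq
    · obtain ⟨rq, gq, h1, h2, h3⟩ := hcomp q hq
      have hqp : q ≠ p := fun h => hnp (h ▸ hq)
      have hrqpre : rq ∈ pre := pvB_g_sub_pre hInv' h2 rq (hcls rq gq h2).1
      have hrqp : rq ≠ p := fun h => hnp (h ▸ hrqpre)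
      refine ⟨rq, gq, ?_, ?_, h3⟩
      · rw [PySem.Dict.get?_insert, if_neg hqp]
        exact h1
      · rw [PySem.Dict.get?_insert, if_neg hrqp]
        exact h2
    · rw [List.mem_singleton] at hq
      obtain rfl := hq.symm
      refine ⟨p, [p], ?_, ?_, List.mem_cons_self⟩
      · rw [PySem.Dict.get?_insert, if_pos rfl]
      · rw [PySem.Dict.get?_insert, if_pos rfl]
  · rw [pv_keys_insert_fresh _ _ _ hpkeys]
    refine List.pairwise_append.2 ⟨hkeys, List.pairwise_singleton _ _, ?_⟩
    intro a ha b hb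
    rw [List.mem_singleton] at hb
    obtain rfl := hb.symm
    exact hltp a (pvB_key_pre hInv' ha)
  · intro k gk h
    by_cases hkp : k = p
    · obtain rfl := hkp.symm
      rw [PySem.Dict.get?_insert, if_pos rfl] at h
      have hg : [p] = gk := Option.some.inj h
      subst hg
      have hclosedC : ∀ x b, x ∈ [p] → pvStepR (pre ++ [p]) x b → b ∈ [p] := by
        intro x b hx hstep
        rw [List.mem_singleton] at hx
        obtain rfl := hx.symm
        rcases List.mem_append.1 hstep.2.1 with hb | hb
        · exact absurd hstep.2.2 (hnone b hb)
        · exact hb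
      refine ⟨List.mem_cons_self, ?_, ?_, ?_⟩
      · intro a
        constructor
        · intro ha
          rw [List.mem_singleton] at ha
          obtain rfl := ha.symm
          exact Relation.ReflTransGen.refl
        · exact pvClosed_conn hclosedC List.mem_cons_self
      · intro q hq hlt
        have hq2 := pvClosed_conn hclosedC List.mem_cons_self hq
        rw [List.mem_singleton] at hq2
        obtain rfl := hq2.symm
        exact pvLt_irrefl p hlt
      · intro q hq
        rw [List.mem_singleton] at hq
        obtain rfl := hq.symm
        rw [PySem.Dict.get?_insert, if_pos rfl]
    · rw [PySem.Dict.get?_insert, if_neg hkp] at h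
      obtain ⟨hkg, hchar, hmin, hlab⟩ := hcls k gk h
      have hsub : ∀ a ∈ gk, a ∈ pre := pvB_g_sub_pre hInv' h
      have hclosedC : ∀ x b, x ∈ gk → pvStepR (pre ++ [p]) x b → b ∈ gk := by
        intro x b hx hstep
        rcases List.mem_append.1 hstep.2.1 with hb | hb
        · exact pvB_class_closed_step hInv' h hx ⟨hsub x hx, hb, hstep.2.2⟩
        · rw [List.mem_singleton] at hb
          obtain rfl := hb.symm
          exact absurd (pvAdjP_symm hstep.2.2) (hnone x (hsub x hx))
      refine ⟨hkg, ?_, ?_, ?_⟩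
      · intro a
        exact ⟨fun ha => hmono ((hchar a).1 ha), pvClosed_conn hclosedC hkg⟩
      · intro q hq hlt
        exact hmin q ((hchar q).1 (pvClosed_conn hclosedC hkg hq)) hlt
      · intro q hq
        have hqp : q ≠ p := fun h' => hnp (h' ▸ hsub q hq)
        rw [PySem.Dict.get?_insert, if_neg hqp]
        exact hlab q hq

lemma pvB_step_single (pre : List (Int × Int)) (p r : Int × Int)
    (label : PySem.Dict (Int × Int) (Int × Int))
    (members : PySem.Dict (Int × Int) (List (Int × Int)))
    (hInv : pvInvB pre (label, members))
    (hltp : ∀ q ∈ pre, pvLt q p) (hnp : p ∉ pre)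
    (hnbr : ∀ q, q ∈ pre → pvAdjP p q → label.get? q = some r)
    (hex : ∃ q, q ∈ pre ∧ pvAdjP p q ∧ label.get? q = some r) :
    pvInvB (pre ++ [p]) (label.insert p r, members.modify r [] (fun g => g ++ [p])) := by
  obtain ⟨hdom, hcomp, hkeys, hcls⟩ := hInv
  have hInv' : pvInvB pre (label, members) := ⟨hdom, hcomp, hkeys, hcls⟩
  obtain ⟨q0, hq0pre, hq0adj, hq0lab⟩ := hex
  obtain ⟨g, hg, hq0g⟩ := pvB_label_class hInv' hq0lab
  have hcl := hcls r g hg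
  have hsubg : ∀ a ∈ g, a ∈ pre := pvB_g_sub_pre hInv' hg
  have hrpre : r ∈ pre := hsubg r hcl.1
  have hrp : r ≠ p := fun h => hnp (h ▸ hrpre)
  have hpg : p ∉ g := fun h => hnp (hsubg p h)
  have hmono : ∀ {x y : Int × Int}, pvConn pre x y → pvConn (pre ++ [p]) x y :=
    fun h => pvConn_mono (fun z hz => List.mem_append.2 (Or.inl hz)) h
  have hppre' : p ∈ pre ++ [p] := List.mem_append.2 (Or.inr List.mem_cons_self)
  have hnbrg : ∀ q, q ∈ pre → pvAdjP p q → q ∈ g := by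
    intro q hq hadj
    obtain ⟨g', hg', hqg'⟩ := pvB_label_class hInv' (hnbr q hq hadj)
    rw [hg] at hg'
    have hEq := Option.some.inj hg'
    rw [hEq]
    exact hqg'
  have hm'r : (members.modify r [] (fun g => g ++ [p])).get? r = some (g ++ [p]) :=
    pv_get?_modify_self members r g _ hg
  have hm'ne : ∀ k, k ≠ r → (members.modify r [] (fun g => g ++ [p])).get? k = members.get? k :=
    fun k hk => pv_get?_modify_ne members r k _ hk
  have hkeys' : (members.modify r [] (fun g => g ++ [p])).keys = members.keys :=
    pv_keys_modify_of_mem members r _ (pv_get?_some_mem_keys hg)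
  have hconn_rp : pvConn (pre ++ [p]) r p :=
    (hmono ((hcl.2.1 q0).1 hq0g)).tail
      ⟨List.mem_append.2 (Or.inl hq0pre), hppre', pvAdjP_symm hq0adj⟩
  have hC : ∀ x b, x ∈ g ++ [p] → pvStepR (pre ++ [p]) x b → b ∈ g ++ [p] := by
    intro x b hx hstep
    rcases List.mem_append.1 hstep.2.1 with hb | hb
    · rcases List.mem_append.1 hx with hxg | hxp
      · exact List.mem_append.2
          (Or.inl (pvB_class_closed_step hInv' hg hxg ⟨hsubg x hxg, hb, hstep.2.2⟩))
      · rw [List.mem_singleton] at hxp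
        obtain rfl := hxp.symm
        exact List.mem_append.2 (Or.inl (hnbrg b hb hstep.2.2))
    · rw [List.mem_singleton] at hb
      obtain rfl := hb.symm
      exact List.mem_append.2 (Or.inr List.mem_cons_self)
  have hCchar : ∀ a, a ∈ g ++ [p] ↔ pvConn (pre ++ [p]) r a := by
    intro a
    constructor
    · intro ha
      rcases List.mem_append.1 ha with hag | hap
      · exact hmono ((hcl.2.1 a).1 hag)
      · rw [List.mem_singleton] at hap
        obtain rfl := hap.symm
        exact hconn_rp
    · exact pvClosed_conn hC (List.mem_append.2 (Or.inl hcl.1))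
  refine ⟨?_, ?_, ?_, ?_⟩
  · intro q rq h
    by_cases hqp : q = p
    · obtain rfl := hqp.symm
      exact hppre'
    · rw [PySem.Dict.get?_insert, if_neg hqp] at h
      exact List.mem_append.2 (Or.inl (hdom q rq h))
  · intro q hq
    rcases List.mem_append.1 hq with hq | hq
    · obtain ⟨rq, gq, h1, h2, h3⟩ := hcomp q hq
      have hqp : q ≠ p := fun h => hnp (h ▸ hq)
      by_cases hrq : rq = r
      · refine ⟨r, g ++ [p], ?_, hm'r, ?_⟩
        · rw [PySem.Dict.get?_insert, if_neg hqp, ← hrq]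
          exact h1
        · obtain rfl := hrq.symm
          rw [hg] at h2
          have hEq := Option.some.inj h2
          exact List.mem_append.2 (Or.inl (by rw [hEq]; exact h3))
      · refine ⟨rq, gq, ?_, ?_, h3⟩
        · rw [PySem.Dict.get?_insert, if_neg hqp]
          exact h1
        · rw [hm'ne rq hrq]
          exact h2
    · rw [List.mem_singleton] at hq
      obtain rfl := hq.symm
      refine ⟨r, g ++ [p], ?_, hm'r, List.mem_append.2 (Or.inr List.mem_cons_self)⟩
      rw [PySem.Dict.get?_insert, if_pos rfl]
  · rw [hkeys']
    exact hkeys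
  · intro k gk h
    by_cases hkr : k = r
    · obtain rfl := hkr.symm
      rw [hm'r] at h
      have hEq := Option.some.inj h
      subst hEq
      refine ⟨List.mem_append.2 (Or.inl hcl.1), hCchar, ?_, ?_⟩
      · intro q hq hlt
        rcases List.mem_append.1 ((hCchar q).2 hq) with hqg | hqp
        · exact hcl.2.2.1 q ((hcl.2.1 q).1 hqg) hlt
        · rw [List.mem_singleton] at hqp
          obtain rfl := hqp.symm
          exact pvLt_asymm (hltp r hrpre) hlt
      · intro q hq
        rcases List.mem_append.1 hq with hqg | hqp
        · have hqp' : q ≠ p := fun h' => hpg (h' ▸ hqg)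
          rw [PySem.Dict.get?_insert, if_neg hqp']
          exact hcl.2.2.2 q hqg
        · rw [List.mem_singleton] at hqp
          obtain rfl := hqp.symm
          rw [PySem.Dict.get?_insert, if_pos rfl]
    · rw [hm'ne k hkr] at h
      obtain ⟨hkg, hchar, hmin, hlab⟩ := hcls k gk h
      have hsubk : ∀ a ∈ gk, a ∈ pre := pvB_g_sub_pre hInv' h
      have hCk : ∀ x b, x ∈ gk → pvStepR (pre ++ [p]) x b → b ∈ gk := by
        intro x b hx hstep
        rcases List.mem_append.1 hstep.2.1 with hb | hb
        · exact pvB_class_closed_step hInv' h hx ⟨hsubk x hx, hb, hstep.2.2⟩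
        · rw [List.mem_singleton] at hb
          obtain rfl := hb.symm
          have hxlab := hnbr x (hsubk x hx) (pvAdjP_symm hstep.2.2)
          rw [hlab x hx] at hxlab
          exact absurd (Option.some.inj hxlab) hkr
      refine ⟨hkg, ?_, ?_, ?_⟩
      · intro a
        exact ⟨fun ha => hmono ((hchar a).1 ha), pvClosed_conn hCk hkg⟩
      · intro q hq hlt
        exact hmin q ((hchar q).1 (pvClosed_conn hCk hkg hq)) hlt
      · intro q hq
        have hqp : q ≠ p := fun h' => hnp (h' ▸ hsubk q hq)
        rw [PySem.Dict.get?_insert, if_neg hqp]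
        exact hlab q hq

lemma pvB_step_two (pre : List (Int × Int)) (p r o : Int × Int)
    (label : PySem.Dict (Int × Int) (Int × Int))
    (members : PySem.Dict (Int × Int) (List (Int × Int)))
    (hInv : pvInvB pre (label, members))
    (hltp : ∀ q ∈ pre, pvLt q p) (hnp : p ∉ pre)
    (hrlt : pvLt r o)
    (hnbr : ∀ q, q ∈ pre → pvAdjP p q → label.get? q = some r ∨ label.get? q = some o)
    (hexr : ∃ q, q ∈ pre ∧ pvAdjP p q ∧ label.get? q = some r)
    (hexo : ∃ q, q ∈ pre ∧ pvAdjP p q ∧ label.get? q = some o) :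
    pvInvB (pre ++ [p])
      ((((members.modify r [] (fun g => g ++ [p])).getD o []).foldl
          (fun st q => (st.1.insert q r, st.2.modify r [] (fun g => g ++ [q])))
          (label.insert p r, (members.modify r [] (fun g => g ++ [p])).erase o))) := by
  obtain ⟨hdom, hcomp, hkeys, hcls⟩ := hInv
  have hInv' : pvInvB pre (label, members) := ⟨hdom, hcomp, hkeys, hcls⟩
  have hro : r ≠ o := pvLt_ne hrlt
  obtain ⟨qr, hqrpre, hqradj, hqrlab⟩ := hexr
  obtain ⟨qo, hqopre, hqoadj, hqolab⟩ := hexo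
  obtain ⟨gr, hgr, hqrg⟩ := pvB_label_class hInv' hqrlab
  obtain ⟨go, hgo, hqog⟩ := pvB_label_class hInv' hqolab
  have hclr := hcls r gr hgr
  have hclo := hcls o go hgo
  have hsubr : ∀ a ∈ gr, a ∈ pre := pvB_g_sub_pre hInv' hgr
  have hsubo : ∀ a ∈ go, a ∈ pre := pvB_g_sub_pre hInv' hgo
  have hrpre : r ∈ pre := hsubr r hclr.1
  have hopre : o ∈ pre := hsubo o hclo.1
  have hrp : r ≠ p := fun h => hnp (h ▸ hrpre)
  have hpgr : p ∉ gr := fun h => hnp (hsubr p h)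
  have hpgo : p ∉ go := fun h => hnp (hsubo p h)
  have hdisj : ∀ a ∈ gr, a ∉ go := by
    intro a har hao
    have h1 := hclr.2.2.2 a har
    have h2 := hclo.2.2.2 a hao
    rw [h1] at h2
    exact hro (Option.some.inj h2)
  have hmono : ∀ {x y : Int × Int}, pvConn pre x y → pvConn (pre ++ [p]) x y :=
    fun h => pvConn_mono (fun z hz => List.mem_append.2 (Or.inl hz)) h
  have hppre' : p ∈ pre ++ [p] := List.mem_append.2 (Or.inr List.mem_cons_self)
  have hnbr2 : ∀ q, q ∈ pre → pvAdjP p q → q ∈ gr ∨ q ∈ go := by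
    intro q hq hadj
    rcases hnbr q hq hadj with h | h
    · obtain ⟨g', hg', hqg'⟩ := pvB_label_class hInv' h
      rw [hgr] at hg'
      exact Or.inl (by rw [Option.some.inj hg']; exact hqg')
    · obtain ⟨g', hg', hqg'⟩ := pvB_label_class hInv' h
      rw [hgo] at hg'
      exact Or.inr (by rw [Option.some.inj hg']; exact hqg')
  -- the state after members[r].append(p)
  have hm1r : (members.modify r [] (fun g => g ++ [p])).get? r = some (gr ++ [p]) :=
    pv_get?_modify_self members r gr _ hgr
  have hm1ne : ∀ k, k ≠ r → (members.modify r [] (fun g => g ++ [p])).get? k = members.get? k :=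
    fun k hk => pv_get?_modify_ne members r k _ hk
  have hm1keys : (members.modify r [] (fun g => g ++ [p])).keys = members.keys :=
    pv_keys_modify_of_mem members r _ (pv_get?_some_mem_keys hgr)
  have hg2 : (members.modify r [] (fun g => g ++ [p])).getD o [] = go := by
    rw [PySem.Dict.getD_eq_get?_getD, hm1ne o (fun h => hro h.symm), hgo]
    rfl
  have hm1er : ((members.modify r [] (fun g => g ++ [p])).erase o).get? r
      = some (gr ++ [p]) := by
    rw [pv_get?_erase_ne _ o r hro]
    exact hm1r
  obtain ⟨l', m', hfold, hin, hout, hm'r, hm'neK, hm'keys⟩ :=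
    pv_merge_fold r go (label.insert p r)
      ((members.modify r [] (fun g => g ++ [p])).erase o) (gr ++ [p]) hm1er
  rw [hg2, hfold]
  have hm'other : ∀ k, k ≠ r → k ≠ o → m'.get? k = members.get? k := by
    intro k h1 h2
    rw [hm'neK k h1, pv_get?_erase_ne _ _ _ h2, hm1ne k h1]
  have hl'p : l'.get? p = some r := by
    rw [hout p hpgo, PySem.Dict.get?_insert, if_pos rfl]
  have hl'gr : ∀ q ∈ gr, l'.get? q = some r := by
    intro q hq
    have hqgo : q ∉ go := hdisj q hq
    have hqp : q ≠ p := fun h' => hpgr (h' ▸ hq)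
    rw [hout q hqgo, PySem.Dict.get?_insert, if_neg hqp]
    exact hclr.2.2.2 q hq
  have hconn_rp : pvConn (pre ++ [p]) r p :=
    (hmono ((hclr.2.1 qr).1 hqrg)).tail
      ⟨List.mem_append.2 (Or.inl hqrpre), hppre', pvAdjP_symm hqradj⟩
  have hconn_pgo : ∀ a ∈ go, pvConn (pre ++ [p]) p a := by
    intro a ha
    refine Relation.ReflTransGen.trans
      (Relation.ReflTransGen.single ⟨hppre', List.mem_append.2 (Or.inl hqopre), hqoadj⟩) ?_
    exact hmono (pvConn_trans (pvConn_symm ((hclo.2.1 qo).1 hqog)) ((hclo.2.1 a).1 ha))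
  have hC : ∀ x b, x ∈ (gr ++ [p]) ++ go → pvStepR (pre ++ [p]) x b →
      b ∈ (gr ++ [p]) ++ go := by
    intro x b hx hstep
    rcases List.mem_append.1 hstep.2.1 with hb | hb
    · rcases List.mem_append.1 hx with hx1 | hxo
      · rcases List.mem_append.1 hx1 with hxg | hxp
        · exact List.mem_append.2 (Or.inl (List.mem_append.2 (Or.inl
            (pvB_class_closed_step hInv' hgr hxg ⟨hsubr x hxg, hb, hstep.2.2⟩))))
        · rw [List.mem_singleton] at hxp
          obtain rfl := hxp.symm
          rcases hnbr2 b hb hstep.2.2 with h | h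
          · exact List.mem_append.2 (Or.inl (List.mem_append.2 (Or.inl h)))
          · exact List.mem_append.2 (Or.inr h)
      · exact List.mem_append.2 (Or.inr
          (pvB_class_closed_step hInv' hgo hxo ⟨hsubo x hxo, hb, hstep.2.2⟩))
    · rw [List.mem_singleton] at hb
      obtain rfl := hb.symm
      exact List.mem_append.2 (Or.inl (List.mem_append.2 (Or.inr List.mem_cons_self)))
  have hCchar : ∀ a, a ∈ (gr ++ [p]) ++ go ↔ pvConn (pre ++ [p]) r a := by
    intro a
    constructor
    · intro ha
      rcases List.mem_append.1 ha with hx1 | hxo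
      · rcases List.mem_append.1 hx1 with hxg | hxp
        · exact hmono ((hclr.2.1 a).1 hxg)
        · rw [List.mem_singleton] at hxp
          obtain rfl := hxp.symm
          exact hconn_rp
      · exact pvConn_trans hconn_rp (hconn_pgo a hxo)
    · exact pvClosed_conn hC
        (List.mem_append.2 (Or.inl (List.mem_append.2 (Or.inl hclr.1))))
  refine ⟨?_, ?_, ?_, ?_⟩
  · intro q rq h
    by_cases hqgo : q ∈ go
    · exact List.mem_append.2 (Or.inl (hsubo q hqgo))
    · rw [hout q hqgo] at h
      by_cases hqp : q = p
      · obtain rfl := hqp.symm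
        exact hppre'
      · rw [PySem.Dict.get?_insert, if_neg hqp] at h
        exact List.mem_append.2 (Or.inl (hdom q rq h))
  · intro q hq
    rcases List.mem_append.1 hq with hq | hq
    · obtain ⟨rq, gq, h1, h2, h3⟩ := hcomp q hq
      by_cases hrq : rq = r
      · obtain rfl := hrq.symm
        rw [hgr] at h2
        have hqgr : q ∈ gr := by rw [Option.some.inj h2]; exact h3
        exact ⟨r, (gr ++ [p]) ++ go, hl'gr q hqgr, hm'r,
          List.mem_append.2 (Or.inl (List.mem_append.2 (Or.inl hqgr)))⟩
      · by_cases hro2 : rq = o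
        · obtain rfl := hro2.symm
          rw [hgo] at h2
          have hqgo : q ∈ go := by rw [Option.some.inj h2]; exact h3
          exact ⟨r, (gr ++ [p]) ++ go, hin q hqgo, hm'r, List.mem_append.2 (Or.inr hqgo)⟩
        · have hqgo : q ∉ go := by
            intro hh
            have h4 := hclo.2.2.2 q hh
            rw [h1] at h4
            exact hro2 (Option.some.inj h4)
          have hqp : q ≠ p := fun h' => hnp (h' ▸ hq)
          refine ⟨rq, gq, ?_, ?_, h3⟩
          · rw [hout q hqgo, PySem.Dict.get?_insert, if_neg hqp]
            exact h1
          · rw [hm'other rq hrq hro2]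
            exact h2
    · rw [List.mem_singleton] at hq
      obtain rfl := hq.symm
      exact ⟨r, (gr ++ [p]) ++ go, hl'p, hm'r,
        List.mem_append.2 (Or.inl (List.mem_append.2 (Or.inr List.mem_cons_self)))⟩
  · rw [hm'keys, pv_keys_erase, hm1keys]
    exact List.Pairwise.sublist List.filter_sublist hkeys
  · intro k gk h
    by_cases hkr : k = r
    · obtain rfl := hkr.symm
      rw [hm'r] at h
      have hEq := Option.some.inj h
      subst hEq
      refine ⟨List.mem_append.2 (Or.inl (List.mem_append.2 (Or.inl hclr.1))), hCchar, ?_, ?_⟩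
      · intro q hq hlt
        rcases List.mem_append.1 ((hCchar q).2 hq) with h1 | h1
        · rcases List.mem_append.1 h1 with h2 | h2
          · exact hclr.2.2.1 q ((hclr.2.1 q).1 h2) hlt
          · rw [List.mem_singleton] at h2
            obtain rfl := h2.symm
            exact pvLt_asymm (hltp r hrpre) hlt
        · exact hclo.2.2.1 q ((hclo.2.1 q).1 h1) (pvLt_trans hlt hrlt)
      · intro q hq
        rcases List.mem_append.1 hq with h1 | h1
        · rcases List.mem_append.1 h1 with h2 | h2
          · exact hl'gr q h2
          · rw [List.mem_singleton] at h2
            obtain rfl := h2.symm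
            exact hl'p
        · exact hin q h1
    · have hko : k ≠ o := by
        intro hh
        obtain rfl := hh.symm
        rw [hm'neK o hkr, pv_get?_erase_self] at h
        cases h
      rw [hm'other k hkr hko] at h
      obtain ⟨hkg, hchar, hmin, hlab⟩ := hcls k gk h
      have hsubk : ∀ a ∈ gk, a ∈ pre := pvB_g_sub_pre hInv' h
      have hCk : ∀ x b, x ∈ gk → pvStepR (pre ++ [p]) x b → b ∈ gk := by
        intro x b hx hstep
        rcases List.mem_append.1 hstep.2.1 with hb | hb
        · exact pvB_class_closed_step hInv' h hx ⟨hsubk x hx, hb, hstep.2.2⟩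
        · rw [List.mem_singleton] at hb
          obtain rfl := hb.symm
          rcases hnbr x (hsubk x hx) (pvAdjP_symm hstep.2.2) with h4 | h4
          · rw [hlab x hx] at h4
            exact absurd (Option.some.inj h4) hkr
          · rw [hlab x hx] at h4
            exact absurd (Option.some.inj h4) hko
      refine ⟨hkg, ?_, ?_, ?_⟩
      · intro a
        exact ⟨fun ha => hmono ((hchar a).1 ha), pvClosed_conn hCk hkg⟩
      · intro q hq hlt
        exact hmin q ((hchar q).1 (pvClosed_conn hCk hkg hq)) hlt
      · intro q hq
        have hqgo : q ∉ go := by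
          intro hh
          have h5 := hclo.2.2.2 q hh
          rw [hlab q hq] at h5
          exact hko (Option.some.inj h5)
        have hqp : q ≠ p := fun h' => hnp (h' ▸ hsubk q hq)
        rw [hout q hqgo, PySem.Dict.get?_insert, if_neg hqp]
        exact hlab q hq

lemma pvB_step (positions pre rest : List (Int × Int)) (p : Int × Int)
    (st : PySem.Dict (Int × Int) (Int × Int) × PySem.Dict (Int × Int) (List (Int × Int)))
    (hpw : positions.Pairwise pvLt) (heq : positions = pre ++ p :: rest)
    (hInv : pvInvB pre st) : pvInvB (pre ++ [p]) (pvUFStep st p) := by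
  obtain ⟨label, members⟩ := st
  have hltp : ∀ q ∈ pre, pvLt q p := by
    have hp2 := heq ▸ hpw
    exact fun q hq => (List.pairwise_append.1 hp2).2.2 q hq p List.mem_cons_self
  have hnp : p ∉ pre := fun h => pvLt_irrefl p (hltp p h)
  have hadjup : pvAdjP p (p.1 - 1, p.2) := by unfold pvAdjP; simp
  have hadjleft : pvAdjP p (p.1, p.2 - 1) := by unfold pvAdjP; simp
  have hcases : ∀ q, q ∈ pre → pvAdjP p q → q = (p.1 - 1, p.2) ∨ q = (p.1, p.2 - 1) :=
    fun q hq hadj => pvAdj_lt_cases hadj (hltp q hq)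
  have hnotpre : ∀ q : Int × Int, label.get? q = none → q ∉ pre := by
    intro q hnone hq
    obtain ⟨r', g', h1, _, _⟩ := hInv.2.1 q hq
    rw [hnone] at h1
    cases h1
  rcases hu : label.get? (p.1 - 1, p.2) with _ | ru <;>
    rcases hl : label.get? (p.1, p.2 - 1) with _ | rl
  · -- no labelled neighbour: p forms a fresh singleton class
    have hroots : pvRoots label p = [] := by simp [pvRoots, hu, hl]
    have hstep : pvUFStep (label, members) p = (label.insert p p, members.insert p [p]) := by
      unfold pvUFStep
      rw [hroots]
    rw [hstep]
    refine pvB_step_none pre p label members hInv hltp hnp ?_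
    intro q hq hadj
    rcases hcases q hq hadj with rfl | rfl
    · exact hnotpre _ hu hq
    · exact hnotpre _ hl hq
  · -- only the left neighbour is labelled
    have hroots : pvRoots label p = [rl] := by simp [pvRoots, hu, hl]
    have hstep : pvUFStep (label, members) p
        = (label.insert p rl, members.modify rl [] (fun g => g ++ [p])) := by
      unfold pvUFStep
      rw [hroots]
      simp [PySem.List.min2?]
    rw [hstep]
    refine pvB_step_single pre p rl label members hInv hltp hnp ?_
      ⟨(p.1, p.2 - 1), hInv.1 _ rl hl, hadjleft, hl⟩
    intro q hq hadj
    rcases hcases q hq hadj with rfl | rfl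
    · exact absurd hq (hnotpre _ hu)
    · exact hl
  · -- only the up neighbour is labelled
    have hroots : pvRoots label p = [ru] := by simp [pvRoots, hu, hl]
    have hstep : pvUFStep (label, members) p
        = (label.insert p ru, members.modify ru [] (fun g => g ++ [p])) := by
      unfold pvUFStep
      rw [hroots]
      simp [PySem.List.min2?]
    rw [hstep]
    refine pvB_step_single pre p ru label members hInv hltp hnp ?_
      ⟨(p.1 - 1, p.2), hInv.1 _ ru hu, hadjup, hu⟩
    intro q hq hadj
    rcases hcases q hq hadj with rfl | rfl
    · exact hu
    · exact absurd hq (hnotpre _ hl)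
  · -- both neighbours labelled
    by_cases hrr : rl = ru
    · subst hrr
      have hroots : pvRoots label p = [rl] := by simp [pvRoots, hu, hl]
      have hstep : pvUFStep (label, members) p
          = (label.insert p rl, members.modify rl [] (fun g => g ++ [p])) := by
        unfold pvUFStep
        rw [hroots]
        simp [PySem.List.min2?]
      rw [hstep]
      refine pvB_step_single pre p rl label members hInv hltp hnp ?_
        ⟨(p.1 - 1, p.2), hInv.1 _ rl hu, hadjup, hu⟩
      intro q hq hadj
      rcases hcases q hq hadj with rfl | rfl
      · exact hu
      · exact hl
    · have hroots : pvRoots label p = [ru, rl] := by simp [pvRoots, hu, hl, hrr]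
      obtain ⟨r, hrdef, hcase⟩ := pv_min2_pair ru rl p hrr
      rcases hcase with ⟨hreq, hlt⟩ | ⟨hreq, hlt⟩
      · subst hreq
        have hstep : pvUFStep (label, members) p
            = (((members.modify r [] (fun g => g ++ [p])).getD rl []).foldl
                (fun st q => (st.1.insert q r, st.2.modify r [] (fun g => g ++ [q])))
                (label.insert p r, (members.modify r [] (fun g => g ++ [p])).erase rl)) := by
          have hstep0 : pvUFStep (label, members) p
              = [r, rl].foldl
                  (fun st r2 =>
                    if r2 = (PySem.List.min2? [r, rl] Prod.fst Prod.snd).getD p then st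
                    else
                      (st.2.getD r2 []).foldl
                        (fun st q =>
                          (st.1.insert q ((PySem.List.min2? [r, rl] Prod.fst Prod.snd).getD p),
                           st.2.modify ((PySem.List.min2? [r, rl] Prod.fst Prod.snd).getD p) []
                             (fun g => g ++ [q])))
                        (st.1, st.2.erase r2))
                  (label.insert p ((PySem.List.min2? [r, rl] Prod.fst Prod.snd).getD p),
                   members.modify ((PySem.List.min2? [r, rl] Prod.fst Prod.snd).getD p) []
                     (fun g => g ++ [p])) := by
            unfold pvUFStep
            rw [hroots]
          rw [hstep0, hrdef]
          simp only [List.foldl_cons, List.foldl_nil, if_true]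
          rw [if_neg hrr]
        rw [hstep]
        refine pvB_step_two pre p r rl label members hInv hltp hnp hlt ?_
          ⟨(p.1 - 1, p.2), hInv.1 _ r hu, hadjup, hu⟩
          ⟨(p.1, p.2 - 1), hInv.1 _ rl hl, hadjleft, hl⟩
        intro q hq hadj
        rcases hcases q hq hadj with rfl | rfl
        · exact Or.inl hu
        · exact Or.inr hl
      · subst hreq
        have hstep : pvUFStep (label, members) p
            = (((members.modify r [] (fun g => g ++ [p])).getD ru []).foldl
                (fun st q => (st.1.insert q r, st.2.modify r [] (fun g => g ++ [q])))
                (label.insert p r, (members.modify r [] (fun g => g ++ [p])).erase ru)) := by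
          have hstep0 : pvUFStep (label, members) p
              = [ru, r].foldl
                  (fun st r2 =>
                    if r2 = (PySem.List.min2? [ru, r] Prod.fst Prod.snd).getD p then st
                    else
                      (st.2.getD r2 []).foldl
                        (fun st q =>
                          (st.1.insert q ((PySem.List.min2? [ru, r] Prod.fst Prod.snd).getD p),
                           st.2.modify ((PySem.List.min2? [ru, r] Prod.fst Prod.snd).getD p) []
                             (fun g => g ++ [q])))
                        (st.1, st.2.erase r2))
                  (label.insert p ((PySem.List.min2? [ru, r] Prod.fst Prod.snd).getD p),
                   members.modify ((PySem.List.min2? [ru, r] Prod.fst Prod.snd).getD p) []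
                     (fun g => g ++ [p])) := by
            unfold pvUFStep
            rw [hroots]
          rw [hstep0, hrdef]
          simp only [List.foldl_cons, List.foldl_nil, if_true]
          rw [if_neg (fun h : ru = r => hrr h.symm)]
        rw [hstep]
        refine pvB_step_two pre p r ru label members hInv hltp hnp hlt ?_
          ⟨(p.1, p.2 - 1), hInv.1 _ r hl, hadjleft, hl⟩
          ⟨(p.1 - 1, p.2), hInv.1 _ ru hu, hadjup, hu⟩
        intro q hq hadj
        rcases hcases q hq hadj with rfl | rfl
        · exact Or.inr hu
        · exact Or.inl hl

lemma pvB_fold (positions : List (Int × Int)) (hpw : positions.Pairwise pvLt) :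
    ∀ (rest pre : List (Int × Int)) st, positions = pre ++ rest → pvInvB pre st →
    pvInvB positions (rest.foldl pvUFStep st) := by
  intro rest
  induction rest with
  | nil =>
      intro pre st heq hInv
      rw [List.foldl_nil]
      have hpre : pre = positions := by simpa using heq.symm
      rwa [hpre] at hInv
  | cons p rest ih =>
      intro pre st heq hInv
      rw [List.foldl_cons]
      have heq' : positions = (pre ++ [p]) ++ rest := by simpa using heq
      exact ih (pre ++ [p]) _ heq' (pvB_step positions pre rest p st hpw heq hInv)

-- ---------- glue ----------

-- Two strictly increasing lists with the same members are equal.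
lemma pv_sorted_unique : ∀ (l1 l2 : List (Int × Int)), l1.Pairwise pvLt → l2.Pairwise pvLt →
    (∀ x, x ∈ l1 ↔ x ∈ l2) → l1 = l2 := by
  intro l1
  induction l1 with
  | nil =>
      intro l2 _ _ hmem
      rcases l2 with _ | ⟨b, t2⟩
      · rfl
      · exact absurd ((hmem b).2 List.mem_cons_self) (List.not_mem_nil)
  | cons a t1 ih =>
      intro l2 h1 h2 hmem
      rcases l2 with _ | ⟨b, t2⟩
      · exact absurd ((hmem a).1 List.mem_cons_self) (List.not_mem_nil)
      · rw [List.pairwise_cons] at h1 h2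
        have hab : a = b := by
          rcases List.mem_cons.1 ((hmem a).1 List.mem_cons_self) with h | h
          · exact h
          · rcases List.mem_cons.1 ((hmem b).2 List.mem_cons_self) with h' | h'
            · exact h'.symm
            · exact absurd (h2.1 a h) (pvLt_asymm (h1.1 b h'))
        subst hab
        have htail : ∀ x, x ∈ t1 ↔ x ∈ t2 := by
          intro x
          constructor
          · intro hx
            rcases List.mem_cons.1 ((hmem x).1 (List.mem_cons_of_mem _ hx)) with h | h
            · exact absurd (h ▸ h1.1 x hx) (pvLt_irrefl x)
            · exact h
          · intro hx
            rcases List.mem_cons.1 ((hmem x).2 (List.mem_cons_of_mem _ hx)) with h | h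
            · exact absurd (h ▸ h2.1 x hx) (pvLt_irrefl x)
            · exact h
        rw [ih t2 h1.2 h2.2 htail]

lemma pv_final_glue (positions : List (Int × Int))
    (regs : List (List (Int × Int))) (V : PySem.Set (Int × Int))
    (label : PySem.Dict (Int × Int) (Int × Int))
    (members : PySem.Dict (Int × Int) (List (Int × Int)))
    (hA : pvInvA positions positions (regs, V))
    (hB : pvInvB positions (label, members)) :
    regs.map (fun r => positions.filter (fun q => decide (q ∈ r)))
      = members.values.map
          (fun g => positions.filter (fun q => decide (q ∈ PySem.Set.ofList g))) := by
  obtain ⟨hflat, hndV, hposV, hcloV, htouch, repsA, hrpreA, hrpwA, hlenA, hzipA⟩ := hA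
  obtain ⟨hdomB, hcompB, hkeysB, hclsB⟩ := hB
  dsimp only at hflat hndV hposV hcloV htouch hlenA hzipA hdomB hcompB hkeysB hclsB
  have hknodup : members.keys.Nodup := List.Pairwise.imp (fun h => pvLt_ne h) hkeysB
  have hpairmem : ∀ (i : Nat), i < repsA.length → i < regs.length →
      (repsA[i]!, regs[i]!) ∈ repsA.zip regs := by
    intro i h h'
    have hz : i < (repsA.zip regs).length := by
      rw [List.length_zip]
      omega
    have hzz : (repsA.zip regs)[i] = (repsA[i], regs[i]) := List.getElem_zip
    rw [getElem!_pos repsA i h, getElem!_pos regs i h', ← hzz]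
    exact List.getElem_mem _
  have hAmem : ∀ x, x ∈ repsA ↔
      (x ∈ positions ∧ ∀ q, pvConn positions x q → ¬ pvLt q x) := by
    intro x
    constructor
    · intro hx
      refine ⟨hrpreA _ hx, ?_⟩
      obtain ⟨i, hi, hieq⟩ := List.mem_iff_getElem.1 hx
      have hi2 : i < regs.length := by omega
      have hpr := hpairmem i hi hi2
      rw [getElem!_pos repsA i hi, getElem!_pos regs i hi2, hieq] at hpr
      exact (hzipA _ hpr).2
    · rintro ⟨hxpos, hxmin⟩
      have hxV : x ∈ V := htouch x hxpos
      rw [hflat] at hxV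
      obtain ⟨R, hR, hxR⟩ := List.mem_flatten.1 hxV
      obtain ⟨j, hj, hjeq⟩ := List.mem_iff_getElem.1 hR
      have hj2 : j < repsA.length := by omega
      have hpr := hpairmem j hj2 hj
      rw [getElem!_pos repsA j hj2, getElem!_pos regs j hj, hjeq] at hpr
      have hconn : pvConn positions repsA[j] x := ((hzipA _ hpr).1 x).1 hxR
      have h1 : ¬ pvLt x repsA[j] := (hzipA _ hpr).2 x hconn
      have h2 : ¬ pvLt repsA[j] x := hxmin repsA[j] (pvConn_symm hconn)
      rcases pvLt_total repsA[j] x with h | h | h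
      · exact absurd h h2
      · rw [← h]
        exact List.getElem_mem _
      · exact absurd h h1
  have hBmem : ∀ x, x ∈ members.keys ↔
      (x ∈ positions ∧ ∀ q, pvConn positions x q → ¬ pvLt q x) := by
    intro x
    constructor
    · intro hx
      rcases hg : members.get? x with _ | g
      · exact absurd hx ((PySem.Dict.get?_eq_none_iff_not_mem_keys _ _).1 hg)
      · have hcl := hclsB x g hg
        exact ⟨hdomB x x (hcl.2.2.2 x hcl.1), hcl.2.2.1⟩
    · rintro ⟨hxpos, hxmin⟩
      obtain ⟨r, g, h1, h2, h3⟩ := hcompB x hxpos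
      have hcl := hclsB r g h2
      have hconn : pvConn positions r x := (hcl.2.1 x).1 h3
      have ha : ¬ pvLt x r := hcl.2.2.1 x hconn
      have hb : ¬ pvLt r x := hxmin r (pvConn_symm hconn)
      rcases pvLt_total r x with h | h | h
      · exact absurd h hb
      · rw [← h]
        exact pv_get?_some_mem_keys h2
      · exact absurd h ha
  have hrepseq : repsA = members.keys :=
    pv_sorted_unique repsA members.keys hrpwA hkeysB
      (fun x => (hAmem x).trans (hBmem x).symm)
  have hvalues : members.values.length = members.keys.length := by
    simp [PySem.Dict.values, PySem.Dict.keys]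
  have hlen2 : regs.length = members.values.length := by
    rw [hvalues, ← hrepseq, hlenA]
  refine List.ext_getElem (by simpa using hlen2) ?_
  intro i h1 h2
  rw [List.length_map] at h1 h2
  rw [List.getElem_map, List.getElem_map]
  refine List.filter_congr ?_
  intro q hq
  have hia : i < repsA.length := by rw [hlenA]; exact h1
  have hpr := hpairmem i hia h1
  rw [getElem!_pos repsA i hia, getElem!_pos regs i h1] at hpr
  have hcharA := (hzipA _ hpr).1
  have hik : i < members.keys.length := by rw [← hrepseq]; exact hia
  have hii : i < members.items.length := by
    have : members.keys.length = members.items.length := by simp [PySem.Dict.keys]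
    omega
  have h3 : members.items[i] = (members.keys[i], members.values[i]) := by
    simp [PySem.Dict.keys, PySem.Dict.values]
  have hitems : (members.keys[i]'hik, members.values[i]'h2) ∈ members.items := by
    rw [← h3]
    exact List.getElem_mem _
  have hget := PySem.Dict.get?_of_mem_items members hitems hknodup
  have hcharB := (hclsB _ _ hget).2.1
  have hkey : members.keys[i]'hik = repsA[i]'hia := by
    apply Option.some.inj
    rw [← getElem?_pos members.keys i hik, ← getElem?_pos repsA i hia, hrepseq]
  have hiff : q ∈ regs[i]'h1 ↔ q ∈ PySem.Set.ofList (members.values[i]'h2) := by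
    rw [PySem.Set.mem_ofList]
    constructor
    · intro h
      exact (hcharB q).2 (by rw [hkey]; exact (hcharA q).1 h)
    · intro h
      exact (hcharA q).2 (by rw [← hkey]; exact (hcharB q).1 h)
  exact decide_eq_decide.2 hiff

-- ===== VERDICT (by name: the statement is the Claim_ definition above) =====
theorem get_regions_spec : Claim_equal_get_regions := by
  unfold Claim_equal_get_regions
  intro field plant _
  unfold Spec_get_regions
  simp only [get_regions, get_regions_alt]
  rw [pv_positions_eq field plant]
  have hpw : (pvPositions field plant).Pairwise pvLt := pvPositions_pairwise field plant
  have hInvA0 : pvInvA (pvPositions field plant) [] ([], PySem.Set.empty) := by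
    refine ⟨rfl, List.nodup_nil, ?_, ?_, ?_, [], ?_, List.Pairwise.nil, rfl, ?_⟩
    · intro a ha
      simp [PySem.Set.empty] at ha
    · intro a b ha
      simp [PySem.Set.empty] at ha
    · intro p hp
      cases hp
    · intro r hr
      cases hr
    · intro pr hpr
      cases hpr
  have hInvA := pvA_fold (pvPositions field plant) hpw (pvPositions field plant) []
    ([], PySem.Set.empty) rfl hInvA0
  have hInvB0 : pvInvB [] (PySem.Dict.empty, PySem.Dict.empty) := by
    refine ⟨?_, ?_, ?_, ?_⟩
    · intro q r h
      rw [PySem.Dict.get?_empty] at h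
      cases h
    · intro q hq
      cases hq
    · rw [PySem.Dict.keys_empty]
      exact List.Pairwise.nil
    · intro r g h
      rw [PySem.Dict.get?_empty] at h
      cases h
  have hInvB := pvB_fold (pvPositions field plant) hpw (pvPositions field plant) []
    (PySem.Dict.empty, PySem.Dict.empty) rfl hInvB0
  exact pv_final_glue (pvPositions field plant) _ _ _ _ hInvA hInvB
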